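-- pv_equiv track=rewrite | github.com/kellerdellinger/dnasa | dnasa.py | can_create_complete_graph
-- ===== SOURCE A (Python) =====
-- def can_create_complete_graph(tiles):
-- 	if type(tiles[0]) == list:
-- 		half_edges = []
-- 		for tile in tiles:
-- 			half_edges = half_edges + tile
-- 	else:#in the case of tiles being only a single tile
-- 		half_edges = tiles
--
-- 	if (len(half_edges) % 2 != 0):#easy case
-- 		return False
--
-- 	#match up each half-edge with a bond partner
-- 	used_half_edge = [False] * len(half_edges)
-- 	for i, half_edge in enumerate(half_edges):
-- 		#if this half-edge already has a partner, move to the next half-edge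
-- 		if used_half_edge[i] == True:
-- 			continue
-- 		else:
-- 			used_half_edge[i] = True
-- 			foundPartner = False
-- 			#search for a partner for this half-edge
-- 			for j in range(i + 1, len(half_edges)):
-- 				if (half_edge + half_edges[j] == 0
-- 						and (used_half_edge[j] == False)):
-- 					used_half_edge[j] = True
-- 					foundPartner = True
-- 					break
-- 			if foundPartner == False:
-- 				return False
-- 	return True
-- ===== SOURCE B (Python) =====
-- def can_create_complete_graph(tiles):
-- 	if type(tiles[0]) == list:
-- 		half_edges = [h for tile in tiles for h in tile]
-- 	else:#in the case of tiles being only a single tile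
-- 		half_edges = tiles
--
-- 	if len(half_edges) % 2 != 0:
-- 		return False
--
-- 	#a zero-sum perfect pairing exists iff each value occurs as often as its negation
-- 	counts = {}
-- 	for h in half_edges:
-- 		counts[h] = counts.get(h, 0) + 1
-- 	return all(counts.get(-v, 0) == c for v, c in counts.items())
-- ===== Notes on version B (the rewrite author's own statement) =====
-- stated objective: faster
-- what changed: Replaces the greedy quadratic pair-matching with used-flags by a single counting pass over a dict, returning True iff every value occurs exactly as often as its negation (plus the same even-length early return).
import Mathlib
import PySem

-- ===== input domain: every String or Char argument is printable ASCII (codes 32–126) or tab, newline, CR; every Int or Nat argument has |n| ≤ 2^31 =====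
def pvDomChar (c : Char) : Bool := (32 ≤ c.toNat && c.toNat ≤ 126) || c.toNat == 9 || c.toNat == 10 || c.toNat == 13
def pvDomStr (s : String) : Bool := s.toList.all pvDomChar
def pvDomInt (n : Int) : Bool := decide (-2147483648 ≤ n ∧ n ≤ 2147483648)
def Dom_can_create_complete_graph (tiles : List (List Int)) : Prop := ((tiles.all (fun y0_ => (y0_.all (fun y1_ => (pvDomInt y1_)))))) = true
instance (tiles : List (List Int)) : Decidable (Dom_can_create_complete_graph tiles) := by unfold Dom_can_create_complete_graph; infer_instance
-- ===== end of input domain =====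

-- B replaces A's quadratic greedy zero-sum pair matching by one counting pass over a dict (value/negation counts must agree).

-- ===== PORT A =====
-- inner loop: 'for j in range(i + 1, len(half_edges))', break at the first unused partner with half_edge + half_edges[j] == 0
def aFind (l : List Int) (x : Int) (used : List Bool) (j : Nat) : Option (List Bool) :=
  if h : j < l.length then
    if (x + l.getD j 0 == 0) && (used.getD j true == false) then some (used.set j true)
    else aFind l x used (j + 1)
  else none
termination_by l.length - j

-- outer loop: 'for i, half_edge in enumerate(half_edges)' with early 'return False'
def aLoop (l : List Int) (used : List Bool) (i : Nat) : Bool :=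
  if h : i < l.length then
    if used.getD i false then aLoop l used (i + 1)
    else
      match aFind l (l.getD i 0) (used.set i true) (i + 1) with
      | none => false
      | some u => aLoop l u (i + 1)
  else true
termination_by l.length - i

def can_create_complete_graph (tiles : List (List Int)) : Bool :=
  -- 'type(tiles[0]) == list' always holds at this type; tiles[0] on [] raises IndexError (excluded by Pre_)
  let half_edges := tiles.foldl (fun acc t => acc ++ t) []
  if half_edges.length % 2 ≠ 0 then false
  else aLoop half_edges (List.replicate half_edges.length false) 0

-- ===== PORT B =====
def can_create_complete_graph_alt (tiles : List (List Int)) : Bool :=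
  let half_edges := tiles.flatMap (fun t => t)
  if half_edges.length % 2 ≠ 0 then false
  else
    let counts : PySem.Dict Int Int := half_edges.foldl (fun d h => d.insert h (d.getD h 0 + 1)) PySem.Dict.empty
    counts.items.all (fun p => counts.getD (-p.1) 0 == p.2)

-- ===== PRECONDITION & SPEC =====
-- Pre_ excludes only the empty tiles list, on which both Pythons raise IndexError at tiles[0].
def Pre_can_create_complete_graph (tiles : List (List Int)) : Prop := tiles ≠ []
instance (tiles : List (List Int)) : Decidable (Pre_can_create_complete_graph tiles) := by unfold Pre_can_create_complete_graph; infer_instance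
def pvWitness_can_create_complete_graph : List (List Int) := [[1, -1], [0, 0]]
def Spec_can_create_complete_graph (tiles : List (List Int)) (out : Bool) : Prop := out = can_create_complete_graph_alt tiles
instance (tiles : List (List Int)) (out : Bool) : Decidable (Spec_can_create_complete_graph tiles out) := by unfold Spec_can_create_complete_graph; infer_instance

-- ===== CLAIM (what is proved, stated in full; the proofs are below) =====
def Claim_equal_can_create_complete_graph : Prop := ∀ (tiles : List (List Int)), Dom_can_create_complete_graph tiles → Pre_can_create_complete_graph tiles → Spec_can_create_complete_graph tiles (can_create_complete_graph tiles)

-- ===== LEMMAS AND PROOFS =====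

def removeNeg (x : Int) : List Int → Option (List Int)
  | [] => none
  | y :: ys => if x + y == 0 then some ys else (removeNeg x ys).map (y :: ·)

theorem removeNeg_length {x : Int} : ∀ {xs ys : List Int}, removeNeg x xs = some ys → ys.length + 1 = xs.length := by
  intro xs
  induction xs with
  | nil => intro ys h; simp [removeNeg] at h
  | cons y ys ih =>
    intro zs h
    simp only [removeNeg] at h
    split at h
    · cases h; simp
    · rcases Option.map_eq_some_iff.mp h with ⟨ws, hw, rfl⟩
      have := ih hw
      simp [← this]

def pairRec : List Int → Bool
  | [] => true
  | x :: xs =>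
    match h : removeNeg x xs with
    | none => false
    | some ys => pairRec ys
termination_by l => l.length
decreasing_by
  have := removeNeg_length h
  simp
  omega

theorem pairRec_cons_none {x : Int} {xs : List Int} (h : removeNeg x xs = none) : pairRec (x :: xs) = false := by
  rw [pairRec]
  split
  · rfl
  · rename_i ys hy
    rw [h] at hy; cases hy

theorem pairRec_cons_some {x : Int} {xs ys : List Int} (h : removeNeg x xs = some ys) : pairRec (x :: xs) = pairRec ys := by
  rw [pairRec]
  split
  · rename_i hy
    rw [h] at hy; cases hy
  · rename_i zs hy
    rw [h] at hy
    cases hy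
    rfl

def rem (l : List Int) (used : List Bool) (i : Nat) : List Int :=
  if h : i < l.length then
    if used.getD i false then rem l used (i + 1)
    else l.getD i 0 :: rem l used (i + 1)
  else []
termination_by l.length - i

theorem rem_set_of_lt (l : List Int) (j : Nat) (used : List Bool) (k : Nat) (hjk : j < k) :
    rem l (used.set j true) k = rem l used k := by
  conv_lhs => rw [rem]
  conv_rhs => rw [rem]
  by_cases h : k < l.length
  · simp only [dif_pos h]
    have hg : (used.set j true).getD k false = used.getD k false := by
      simp only [List.getD_eq_getElem?_getD]
      rw [List.getElem?_set_ne (by omega)]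
    rw [hg, rem_set_of_lt l j used (k + 1) (by omega)]
  · simp only [dif_neg h]
termination_by l.length - k

theorem rem_nil (l : List Int) (used : List Bool) (i : Nat) (h : ¬ i < l.length) :
    rem l used i = [] := by
  rw [rem]; simp [h]

theorem rem_drop (l : List Int) : ∀ i, rem l (List.replicate l.length false) i = l.drop i := by
  intro i
  rw [rem]
  by_cases h : i < l.length
  · simp only [dif_pos h]
    have hg : (List.replicate l.length false).getD i false = false := by
      simp [List.getD_eq_getElem?_getD, List.getElem?_replicate, h]
    rw [hg, rem_drop l (i + 1)]
    simp only [if_false, Bool.false_eq_true]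
    rw [List.getD_eq_getElem l 0 h, List.drop_eq_getElem_cons h]
  · simp only [dif_neg h]
    rw [List.drop_eq_nil_of_le (by omega)]
termination_by i => l.length - i

theorem rem_replicate (l : List Int) : rem l (List.replicate l.length false) 0 = l := by
  simpa using rem_drop l 0

theorem getD_eq_getD (us : List Bool) (j : Nat) (hj : j < us.length) (d d' : Bool) :
    us.getD j d = us.getD j d' := by
  rw [List.getD_eq_getElem us d hj, List.getD_eq_getElem us d' hj]

theorem aFind_spec (l : List Int) (x : Int) (j : Nat) (used : List Bool) (hlen : used.length = l.length) :
    (aFind l x used j = none → removeNeg x (rem l used j) = none) ∧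
    (∀ u, aFind l x used j = some u →
      u.length = l.length ∧ removeNeg x (rem l used j) = some (rem l u j) ∧
      ∀ m, m < j → used.getD m false = u.getD m false) := by
  rw [aFind]
  by_cases h : j < l.length
  · rw [dif_pos h]
    by_cases hcond : ((x + l.getD j 0 == 0) && (used.getD j true == false)) = true
    · rw [if_pos hcond]
      have hx : x + l.getD j 0 = 0 := by
        have := (Bool.and_eq_true _ _).mp hcond |>.1; simpa using this
      have hu : used.getD j true = false := by
        have := (Bool.and_eq_true _ _).mp hcond |>.2; simpa using this
      have hu' : ¬ used.getD j false = true := by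
        rw [← getD_eq_getD used j (by omega) false true] at hu
        rw [hu]; simp
      refine ⟨by intro hc; exact absurd hc (by simp), ?_⟩
      intro u hsome
      injection hsome with hv
      subst hv
      refine ⟨by simpa using hlen, ?_, ?_⟩
      · have h1 : rem l used j = l.getD j 0 :: rem l used (j + 1) := by
          rw [rem, dif_pos h, if_neg hu']
        have h2 : rem l (used.set j true) j = rem l used (j + 1) := by
          have hset : (used.set j true).getD j false = true := by
            rw [List.getD_eq_getElem _ false (by simp; omega)]
            simp [List.getElem_set_self]
          rw [rem, dif_pos h, if_pos hset]
          exact rem_set_of_lt l j used (j + 1) (by omega)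
        rw [h1, h2, removeNeg, if_pos (by simpa using hx)]
      · intro m hm
        simp only [List.getD_eq_getElem?_getD]
        rw [List.getElem?_set_ne (by omega)]
    · rw [if_neg hcond]
      have ih := aFind_spec l x (j + 1) used hlen
      by_cases hb : used.getD j false = true
      · have hrem : rem l used j = rem l used (j + 1) := by rw [rem, dif_pos h, if_pos hb]
        refine ⟨by intro hn; rw [hrem]; exact ih.1 hn, ?_⟩
        intro u hsome
        obtain ⟨hul, hrm, hm⟩ := ih.2 u hsome
        have hbu : u.getD j false = true := by rw [← hm j (by omega)]; exact hb
        have hremu : rem l u j = rem l u (j + 1) := by rw [rem, dif_pos h, if_pos hbu]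
        exact ⟨hul, by rw [hrem, hremu]; exact hrm, fun m hmj => hm m (by omega)⟩
      · -- used[j] is unused, so the value test failed: x + l[j] ≠ 0
        have hb' : used.getD j true = false := by
          rw [getD_eq_getD used j (by omega) true false]
          simpa using hb
        have hx : ¬ (x + l.getD j 0 == 0) = true := by
          intro hc
          exact hcond ((Bool.and_eq_true _ _).mpr ⟨hc, by rw [hb']; rfl⟩)
        have hrem : rem l used j = l.getD j 0 :: rem l used (j + 1) := by
          rw [rem, dif_pos h, if_neg hb]
        refine ⟨?_, ?_⟩
        · intro hn
          rw [hrem, removeNeg, if_neg hx, ih.1 hn]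
          rfl
        · intro u hsome
          obtain ⟨hul, hrm, hm⟩ := ih.2 u hsome
          have hbu : ¬ u.getD j false = true := by rw [← hm j (by omega)]; exact hb
          have hremu : rem l u j = l.getD j 0 :: rem l u (j + 1) := by
            rw [rem, dif_pos h, if_neg hbu]
          refine ⟨hul, ?_, fun m hmj => hm m (by omega)⟩
          rw [hrem, hremu, removeNeg, if_neg hx, hrm]
          rfl
  · rw [dif_neg h]
    refine ⟨?_, ?_⟩
    · intro _
      rw [rem_nil l used j h, removeNeg]
    · intro u hu; cases hu
termination_by l.length - j

theorem aLoop_spec (l : List Int) (i : Nat) (used : List Bool) (hlen : used.length = l.length) :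
    aLoop l used i = pairRec (rem l used i) := by
  rw [aLoop]
  by_cases h : i < l.length
  · rw [dif_pos h]
    by_cases hb : used.getD i false = true
    · have hrem : rem l used i = rem l used (i + 1) := by rw [rem, dif_pos h, if_pos hb]
      rw [hrem, if_pos hb]
      exact aLoop_spec l (i + 1) used hlen
    · have hrem : rem l used i = l.getD i 0 :: rem l used (i + 1) := by
        rw [rem, dif_pos h, if_neg hb]
      rw [if_neg hb, hrem]
      have hset : rem l (used.set i true) (i + 1) = rem l used (i + 1) :=
        rem_set_of_lt l i used (i + 1) (by omega)
      have hfs := aFind_spec l (l.getD i 0) (i + 1) (used.set i true) (by simpa using hlen)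
      cases hfind : aFind l (l.getD i 0) (used.set i true) (i + 1) with
      | none =>
        have hnone := hfs.1 hfind
        rw [hset] at hnone
        rw [pairRec_cons_none hnone]
      | some u =>
        obtain ⟨hul, hrm, _⟩ := hfs.2 u hfind
        rw [hset] at hrm
        rw [pairRec_cons_some hrm]
        exact aLoop_spec l (i + 1) u (by omega)
  · rw [dif_neg h]
    rw [rem_nil l used i h, pairRec]
termination_by l.length - i

def condP (l : List Int) : Prop := ∀ v : Int, l.count (-v) = l.count v

theorem removeNeg_none_iff {x : Int} {xs : List Int} : removeNeg x xs = none ↔ (-x) ∉ xs := by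
  induction xs with
  | nil => simp [removeNeg]
  | cons y ys ih =>
    simp only [removeNeg, List.mem_cons]
    split
    · rename_i h
      simp only [beq_iff_eq] at h
      constructor
      · intro hc; simp at hc
      · intro hc; exact absurd (Or.inl (by omega)) hc
    · rename_i h
      simp only [beq_iff_eq] at h
      rw [Option.map_eq_none_iff, ih]
      constructor
      · intro hn hc; rcases hc with hc | hc
        · omega
        · exact hn hc
      · intro hc hm; exact hc (Or.inr hm)

theorem removeNeg_count {x : Int} : ∀ {xs ys : List Int}, removeNeg x xs = some ys →
    ∀ v : Int, xs.count v = ys.count v + (if v = -x then 1 else 0) := by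
  intro xs
  induction xs with
  | nil => intro ys h; simp [removeNeg] at h
  | cons y ys ih =>
    intro zs h v
    simp only [removeNeg] at h
    split at h
    · rename_i he
      simp only [beq_iff_eq] at he
      cases h
      by_cases hv : v = y <;> by_cases hvx : v = -x <;>
        simp [List.count_cons, hv, hvx] <;> omega
    · rename_i he
      simp only [beq_iff_eq] at he
      rcases Option.map_eq_some_iff.mp h with ⟨ws, hw, rfl⟩
      have := ih hw v
      by_cases hv : v = y <;> by_cases hvx : v = -x <;>
        simp [List.count_cons, hv, hvx] at this ⊢ <;> omega

theorem pairRec_iff (l : List Int) : pairRec l = true ↔ (condP l ∧ 2 ∣ l.count 0) := by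
  match l with
  | [] => simp [pairRec, condP]
  | x :: xs =>
    cases hrm : removeNeg x xs with
    | none =>
      rw [pairRec_cons_none hrm]
      have hmem : (-x) ∉ xs := removeNeg_none_iff.mp hrm
      simp only [Bool.false_eq_true, false_iff]
      rintro ⟨hc, he⟩
      have h1 := hc x
      by_cases hx0 : x = 0
      · subst hx0
        have hz : xs.count 0 = 0 := List.count_eq_zero.mpr (by simpa using hmem)
        rw [List.count_cons] at he
        simp [hz] at he
      · have hnx : xs.count (-x) = 0 := List.count_eq_zero.mpr hmem
        rw [List.count_cons, List.count_cons] at h1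
        simp only [beq_iff_eq] at h1
        split_ifs at h1 <;> omega
    | some ys =>
      rw [pairRec_cons_some hrm]
      have hcnt := removeNeg_count hrm
      have hlt : ys.length < xs.length + 1 := by have := removeNeg_length hrm; omega
      rw [pairRec_iff ys]
      constructor
      · rintro ⟨hc, he⟩
        constructor
        · intro v
          have h1 := hc v
          rw [List.count_cons, List.count_cons, hcnt v, hcnt (-v)]
          simp only [beq_iff_eq]
          split_ifs <;> omega
        · have h0 := hcnt 0
          rw [List.count_cons]
          simp only [beq_iff_eq]
          split_ifs at h0 ⊢ <;> omega
      · rintro ⟨hc, he⟩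
        constructor
        · intro v
          have h1 := hc v
          rw [List.count_cons, List.count_cons, hcnt v, hcnt (-v)] at h1
          simp only [beq_iff_eq] at h1
          split_ifs at h1 <;> omega
        · have h0 := hcnt 0
          rw [List.count_cons] at he
          simp only [beq_iff_eq] at he
          split_ifs at h0 he <;> omega
termination_by l.length

theorem zerofree_even : ∀ (n : Nat) (l : List Int), l.length = n → condP l → (0:Int) ∉ l → 2 ∣ l.length := by
  intro n
  induction n using Nat.strong_induction_on with
  | _ n ih =>
    intro l hn hc h0
    match l with
    | [] => simp
    | x :: xs =>
      have hx0 : x ≠ 0 := by rintro rfl; exact h0 (by simp)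
      have h1 := hc x
      have hmem : (-x) ∈ xs := by
        rw [List.count_cons, List.count_cons] at h1
        simp only [beq_iff_eq] at h1
        by_contra hnm
        have : xs.count (-x) = 0 := List.count_eq_zero.mpr hnm
        split_ifs at h1 <;> omega
      set l' := xs.erase (-x) with hl'
      have hcnt : ∀ v : Int, xs.count v = l'.count v + (if v = -x then 1 else 0) := by
        intro v
        by_cases hv : v = -x
        · subst hv
          rw [hl', List.count_erase_self]
          have : 0 < xs.count (-x) := List.count_pos_iff.mpr hmem
          simp; omega
        · rw [hl', List.count_erase_of_ne hv]
          simp [hv]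
      have hc' : condP l' := by
        intro v
        have h2 := hc v
        rw [List.count_cons, List.count_cons, hcnt v, hcnt (-v)] at h2
        simp only [beq_iff_eq] at h2
        split_ifs at h2 <;> omega
      have h0' : (0:Int) ∉ l' := fun hm => h0 (by simp [List.mem_cons]; right; exact (List.erase_subset) hm)
      have hlen : xs.length = l'.length + 1 := by
        rw [hl', List.length_erase_of_mem hmem]
        have : xs.length ≠ 0 := by rintro hh; rw [List.length_eq_zero_iff] at hh; simp [hh] at hmem
        omega
      have := ih l'.length (by rw [List.length_cons] at hn; omega) l' rfl hc' h0'
      simp only [List.length_cons, hlen]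
      omega

theorem count0_parity (l : List Int) (hc : condP l) : (2 ∣ l.length ↔ 2 ∣ l.count 0) := by
  have hcf : condP (l.filter (fun a => !(a == 0))) := by
    intro v
    by_cases hv : v = 0
    · subst hv; norm_num
    · rw [List.count_filter (by simpa using (by omega : ¬ (-v = 0))),
          List.count_filter (by simpa using hv)]
      exact hc v
  have h0f : (0:Int) ∉ l.filter (fun a => !(a == 0)) := by simp [List.mem_filter]
  have hf : 2 ∣ (l.filter (fun a => !(a == 0))).length :=
    zerofree_even _ _ rfl hcf h0f
  have hsplit := List.length_eq_countP_add_countP (p := fun a : Int => a == 0) (l := l)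
  have h1 : List.countP (fun a : Int => a == 0) l = l.count 0 := by
    rw [List.count_eq_countP]
  have h2 : List.countP (fun a : Int => decide ¬(a == 0) = true) l
      = (l.filter (fun a => !(a == 0))).length := by
    rw [← List.countP_eq_length_filter]
    apply List.countP_congr
    intro a _
    simp
  rw [hsplit, h1, h2]
  omega

theorem alt_counts_iff (he : List Int) :
    (((he.foldl (fun d h => d.insert h (d.getD h 0 + 1)) PySem.Dict.empty : PySem.Dict Int Int)).items.all
      (fun p => (he.foldl (fun d h => d.insert h (d.getD h 0 + 1)) PySem.Dict.empty : PySem.Dict Int Int).getD (-p.1) 0 == p.2)) = true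
    ↔ condP he := by
  rw [PySem.Dict.foldl_insert_getD_add_one_eq_counter]
  rw [PySem.Dict.items_counter]
  rw [List.all_map, List.all_eq_true]
  constructor
  · intro h v
    by_cases hv : v ∈ he
    · have := h v ((PySem.Set.mem_ofList he v).mpr hv)
      simp only [Function.comp, PySem.Dict.getD_counter, beq_iff_eq] at this
      exact_mod_cast this
    · have hv0 : he.count v = 0 := List.count_eq_zero.mpr hv
      by_cases hnv : (-v) ∈ he
      · have := h (-v) ((PySem.Set.mem_ofList he (-v)).mpr hnv)
        simp only [Function.comp, PySem.Dict.getD_counter, beq_iff_eq, neg_neg] at this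
        exact_mod_cast this.symm
      · rw [hv0, List.count_eq_zero.mpr hnv]
  · intro h k hk
    simp only [Function.comp, PySem.Dict.getD_counter, beq_iff_eq]
    exact_mod_cast h k

theorem flatten_eq (tiles : List (List Int)) :
    tiles.foldl (fun acc t => acc ++ t) [] = tiles.flatMap (fun t => t) := by
  rw [PySem.List.foldl_append_eq_flatten]
  simp [List.flatMap_id']

-- ===== VERDICT (by name: the statement is the Claim_ definition above) =====
theorem can_create_complete_graph_spec : Claim_equal_can_create_complete_graph := by
  intro tiles _ _
  unfold Spec_can_create_complete_graph
  unfold can_create_complete_graph can_create_complete_graph_alt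
  simp only [flatten_eq tiles]
  set he := tiles.flatMap (fun t => t) with hdef
  by_cases hpar : he.length % 2 ≠ 0
  · rw [if_pos hpar, if_pos hpar]
  · rw [if_neg hpar, if_neg hpar]
    rw [aLoop_spec he 0 (List.replicate he.length false) (by simp), rem_replicate]
    rw [Bool.eq_iff_iff, pairRec_iff, alt_counts_iff]
    have heven : 2 ∣ he.length := Nat.dvd_of_mod_eq_zero (by omega)
    constructor
    · rintro ⟨hc, _⟩; exact hc
    · intro hc; exact ⟨hc, (count0_parity he hc).mp heven⟩
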